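-- pv_equiv track=rewrite | github.com/StefanAvra/codewars-katas | python/solutions/kyu6_encrypt_this.py | encrypt_this
-- ===== SOURCE A (Python) =====
-- def encrypt_this(text):
--     crypt = []
--     for word in text.split():
--         if len(word) == 1:
--             crypt.append(str(ord(word[0])))
--         elif len(word) == 2:
--             crypt.append(f'{ord(word[0])}{word[1]}')
--         else:
--             crypt.append(f'{ord(word[0])}{word[-1]}{word[2:-1]}{word[1:2]}')
--     return ' '.join(crypt)
-- ===== SOURCE B (Python) =====
-- def encrypt_this(text):
--     pieces = []
--     i, n = 0, len(text)
--     first = True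
--     while i < n:
--         if text[i].isspace():
--             i += 1
--             continue
--         j = i + 1
--         while j < n and not text[j].isspace():
--             j += 1
--         if not first:
--             pieces.append(' ')
--         first = False
--         pieces.append(str(ord(text[i])))
--         if j - i >= 2:
--             pieces.append(text[j - 1])
--             pieces.append(text[i + 2:j - 1])
--             if j - i >= 3:
--                 pieces.append(text[i + 1])
--         i = j
--     return ''.join(pieces)
-- ===== Notes on version B (the rewrite author's own statement) =====
-- stated objective: alternative
-- what changed: replaces A's split()/per-word-branch/space-join pipeline with a single manual scanner: it walks the text by index, finds each word span [i,j) itself, and emits the encrypted pieces (ord of first char, last char, middle slice, second char) and the separators directly into one output buffer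
import Mathlib
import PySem

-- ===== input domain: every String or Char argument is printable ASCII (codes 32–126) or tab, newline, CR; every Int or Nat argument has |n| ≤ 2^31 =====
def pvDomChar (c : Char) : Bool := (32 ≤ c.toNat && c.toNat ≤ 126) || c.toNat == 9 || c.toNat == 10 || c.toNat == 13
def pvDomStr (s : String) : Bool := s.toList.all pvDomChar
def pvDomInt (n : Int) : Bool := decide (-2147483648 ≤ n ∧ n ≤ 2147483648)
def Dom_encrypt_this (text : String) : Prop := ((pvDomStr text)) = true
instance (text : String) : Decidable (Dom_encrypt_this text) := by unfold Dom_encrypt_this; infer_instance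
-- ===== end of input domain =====

-- B replaces A's split()/branch/space-join pipeline with a single manual scanner over the
-- characters that finds each word span itself and emits the encrypted pieces directly.

-- str(ord(c)) as a character list (shared by both ports)
def pvOrdStr (c : Char) : List Char := (PySem.Int.toStr (c.toNat : Int)).toList

-- ===== PORT A =====
-- A's per-word body: three branches on len(word), built from slices/indexing
def pvEncWordA (w : List Char) : List Char :=
  if w.length = 1 then pvOrdStr (PySem.List.pyGetD w 0 ' ')
  else if w.length = 2 then pvOrdStr (PySem.List.pyGetD w 0 ' ') ++ [PySem.List.pyGetD w 1 ' ']
  else pvOrdStr (PySem.List.pyGetD w 0 ' ') ++ [PySem.List.pyGetD w (-1) ' ']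
       ++ PySem.List.slice w (some 2) (some (-1)) ++ PySem.List.slice w (some 1) (some 2)

def encrypt_this (text : String) : String :=
  String.ofList (PySem.Chars.join [' '] ((PySem.Chars.split₀ text.toList).map pvEncWordA))

-- ===== PORT B =====
-- inner while loop: collect the rest of the current word (chars up to the next whitespace)
-- and return it with the remaining text
def pvTakeB (s : List Char) : List Char × List Char :=
  match s with
  | [] => ([], [])
  | c :: rest =>
    if PySem.Chars.isspace c then ([], c :: rest)
    else
      let p := pvTakeB rest
      (c :: p.1, p.2)

theorem pvTakeB_snd_le (s : List Char) : (pvTakeB s).2.length ≤ s.length := by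
  induction s with
  | nil => simp [pvTakeB]
  | cons c rest ih =>
    by_cases h : PySem.Chars.isspace c <;> simp [pvTakeB, h]
    omega

-- the pieces emitted for one word: str(ord(first)); if len >= 2 also last char and the
-- middle slice; if len >= 3 also the second char  (w = chars after the first)
def pvWordB (c : Char) (w : List Char) : List Char :=
  pvOrdStr c ++
    match w with
    | [] => []
    | b :: t => (b :: t).getLastD b :: t.dropLast ++ (if t.isEmpty then [] else [b])

-- outer while loop: skip whitespace, take a word span, emit separator (unless first) and pieces
def pvScanB (s : List Char) (first : Bool) : List Char :=
  match s with
  | [] => []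
  | c :: rest =>
    if PySem.Chars.isspace c then pvScanB rest first
    else
      let p := pvTakeB rest
      (if first then [] else [' ']) ++ pvWordB c p.1 ++ pvScanB p.2 false
termination_by s.length
decreasing_by
  all_goals have := pvTakeB_snd_le rest
  all_goals simp
  all_goals omega

def encrypt_this_alt (text : String) : String :=
  String.ofList (pvScanB text.toList true)

-- ===== PRECONDITION & SPEC =====
def Spec_encrypt_this (text : String) (out : String) : Prop := out = encrypt_this_alt text
instance (text : String) (out : String) : Decidable (Spec_encrypt_this text out) := by unfold Spec_encrypt_this; infer_instance

-- ===== CLAIM (what is proved, stated in full; the proofs are below) =====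
def Claim_equal_encrypt_this : Prop := ∀ (text : String), Dom_encrypt_this text → Spec_encrypt_this text (encrypt_this text)

-- ===== LEMMAS AND PROOFS =====

-- characterisation of Python's whitespace split in terms of the scanner's pvTakeB

theorem pv_go_acc (s : List Char) : ∀ (cur : List Char) (acc : List (List Char)),
    PySem.Chars.split₀.go s cur acc = acc.reverse ++ PySem.Chars.split₀.go s cur [] := by
  induction s with
  | nil =>
    intro cur acc
    by_cases hc : cur.isEmpty <;> simp [PySem.Chars.split₀.go, hc]
  | cons c rest ih =>
    intro cur acc
    by_cases hs : PySem.Chars.isspace c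
    · by_cases hc : cur.isEmpty
      · simp only [PySem.Chars.split₀.go, hs, hc, if_true]
        exact ih [] acc
      · simp only [PySem.Chars.split₀.go, hs, hc, if_true]
        rw [ih [] (cur.reverse :: acc), ih [] [cur.reverse]]
        simp
    · simp only [PySem.Chars.split₀.go, hs, Bool.false_eq_true, if_false]
      exact ih (c :: cur) acc

theorem pv_split₀_cons_space {c : Char} (rest : List Char) (h : PySem.Chars.isspace c) :
    PySem.Chars.split₀ (c :: rest) = PySem.Chars.split₀ rest := by
  simp [PySem.Chars.split₀, PySem.Chars.split₀.go, h]

theorem pv_go_word (s : List Char) : ∀ (cur : List Char), cur ≠ [] →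
    PySem.Chars.split₀.go s cur []
      = (cur.reverse ++ (pvTakeB s).1) :: PySem.Chars.split₀ (pvTakeB s).2 := by
  induction s with
  | nil =>
    intro cur hcur
    simp [PySem.Chars.split₀.go, PySem.Chars.split₀, pvTakeB, List.isEmpty_iff, hcur]
  | cons c rest ih =>
    intro cur hcur
    by_cases hs : PySem.Chars.isspace c
    · simp only [PySem.Chars.split₀.go, hs, if_true, List.isEmpty_iff, hcur, if_false,
        pvTakeB]
      rw [pv_go_acc]
      simp only [List.reverse_cons, List.reverse_nil, List.nil_append, List.append_nil]
      rw [show PySem.Chars.split₀ (c :: rest) = PySem.Chars.split₀ rest from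
        pv_split₀_cons_space rest hs]
      simp [PySem.Chars.split₀]
    · simp only [PySem.Chars.split₀.go, hs, Bool.false_eq_true, if_false, pvTakeB]
      rw [ih (c :: cur) (by simp)]
      simp

theorem pv_split₀_cons_word {c : Char} (rest : List Char) (h : ¬ PySem.Chars.isspace c) :
    PySem.Chars.split₀ (c :: rest)
      = (c :: (pvTakeB rest).1) :: PySem.Chars.split₀ (pvTakeB rest).2 := by
  have : PySem.Chars.split₀ (c :: rest) = PySem.Chars.split₀.go rest [c] [] := by
    simp [PySem.Chars.split₀, PySem.Chars.split₀.go, h]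
  rw [this, pv_go_word rest [c] (by simp)]
  simp

-- A's per-word result coincides with B's pieces for one word

theorem pv_clamp_two {n : Nat} (h : 2 ≤ n) : PySem.List.clampIdx n 2 = 2 := by
  simp [PySem.List.clampIdx]; omega

theorem pv_clamp_one {n : Nat} (h : 1 ≤ n) : PySem.List.clampIdx n 1 = 1 := by
  simp [PySem.List.clampIdx]; omega

theorem pv_clamp_neg_one {n : Nat} (h : 1 ≤ n) : PySem.List.clampIdx n (-1) = n - 1 := by
  unfold PySem.List.clampIdx
  rw [if_pos (by omega : (-1:Int) < 0), if_neg (by omega : ¬ (n:Int) + -1 < 0)]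
  omega

theorem pv_slice_two_negone {α : Type} (a b : α) (mid : List α) (last : α) :
    PySem.List.slice (a :: b :: (mid ++ [last])) (some 2) (some (-1)) = mid := by
  have hn : (a :: b :: (mid ++ [last]) : List α).length = mid.length + 3 := by simp
  simp only [PySem.List.slice, hn, pv_clamp_two (by omega : 2 ≤ mid.length + 3),
    pv_clamp_neg_one (by omega : 1 ≤ mid.length + 3)]
  have : mid.length + 3 - 1 - 2 = mid.length := by omega
  rw [this]
  simp

theorem pv_slice_one_two {α : Type} (a b : α) (t : List α) :
    PySem.List.slice (a :: b :: t) (some 1) (some 2) = [b] := by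
  have hn : (a :: b :: t : List α).length = t.length + 2 := by simp
  simp only [PySem.List.slice, hn, pv_clamp_one (by omega : 1 ≤ t.length + 2),
    pv_clamp_two (by omega : 2 ≤ t.length + 2)]
  simp

theorem pv_word_eq (c : Char) (t : List Char) : pvEncWordA (c :: t) = pvWordB c t := by
  match t with
  | [] =>
    simp [pvEncWordA, pvWordB, PySem.List.pyGetD]
  | [b] =>
    simp [pvEncWordA, pvWordB, PySem.List.pyGetD]
  | b :: d :: rest =>
    rcases (d :: rest).eq_nil_or_concat with h | ⟨mid, last, h⟩
    · simp at h
    · rw [List.concat_eq_append] at h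
      rw [h]
      unfold pvEncWordA pvWordB
      have hlen : (c :: b :: (mid ++ [last]) : List Char).length = mid.length + 3 := by simp
      rw [hlen, if_neg (by omega : ¬ mid.length + 3 = 1), if_neg (by omega : ¬ mid.length + 3 = 2)]
      rw [pv_slice_two_negone, pv_slice_one_two]
      have hneg : PySem.List.pyGetD (c :: b :: (mid ++ [last])) (-1) ' ' = last := by
        have h2 : (c :: b :: (mid ++ [last]) : List Char) = (c :: b :: mid) ++ [last] := by simp
        rw [h2]; exact PySem.List.pyGetD_neg_one_append_singleton _ _ _
      have h0 : PySem.List.pyGetD (c :: b :: (mid ++ [last])) 0 ' ' = c := by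
        simp [PySem.List.pyGetD]
      have hlast : (b :: (mid ++ [last])).getLastD b = last := by
        rw [show (b :: (mid ++ [last]) : List Char) = (b :: mid) ++ [last] from rfl,
          List.getLastD_concat]
      rw [hneg, h0]
      show _ = pvOrdStr c ++ ((b :: (mid ++ [last])).getLastD b :: (mid ++ [last]).dropLast
        ++ (if (mid ++ [last]).isEmpty then [] else [b]))
      rw [hlast]
      simp

-- joining lemmas

theorem pv_join_cons (x : List Char) (l : List (List Char)) :
    PySem.Chars.join [' '] (x :: l) = x ++ l.flatMap (fun y => ' ' :: y) := by
  induction l generalizing x with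
  | nil => simp [PySem.Chars.join, List.intercalate]
  | cons y t ih =>
    rw [PySem.Chars.join_cons_cons, ih y]
    simp

theorem pv_scan_false (n : Nat) : ∀ (s : List Char), s.length ≤ n →
    pvScanB s false = (PySem.Chars.split₀ s).flatMap (fun w => ' ' :: pvEncWordA w) := by
  induction n with
  | zero =>
    intro s hs
    have : s = [] := by cases s <;> simp_all
    subst this
    simp [pvScanB, PySem.Chars.split₀, PySem.Chars.split₀.go]
  | succ n ih =>
    intro s hs
    match s with
    | [] => simp [pvScanB, PySem.Chars.split₀, PySem.Chars.split₀.go]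
    | c :: rest =>
      by_cases h : PySem.Chars.isspace c
      · rw [pv_split₀_cons_space rest h]
        simp only [pvScanB, h, if_true]
        exact ih rest (by simp at hs; omega)
      · rw [pv_split₀_cons_word rest h]
        simp only [pvScanB, h, Bool.false_eq_true, if_false]
        rw [ih (pvTakeB rest).2 (by have := pvTakeB_snd_le rest; simp at hs; omega)]
        simp [pv_word_eq]

theorem pv_scan_true (s : List Char) :
    pvScanB s true = PySem.Chars.join [' '] ((PySem.Chars.split₀ s).map pvEncWordA) := by
  induction s with
  | nil => simp [pvScanB, PySem.Chars.split₀, PySem.Chars.split₀.go, PySem.Chars.join,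
      List.intercalate]
  | cons c rest ih =>
    by_cases h : PySem.Chars.isspace c
    · rw [pv_split₀_cons_space rest h]
      simp only [pvScanB, h, if_true]
      exact ih
    · rw [pv_split₀_cons_word rest h]
      simp only [pvScanB, h, Bool.false_eq_true, if_false, if_true, List.map_cons]
      rw [pv_join_cons, pv_scan_false (pvTakeB rest).2.length _ le_rfl]
      simp [pv_word_eq, List.flatMap_map]

-- ===== VERDICT (by name: the statement is the Claim_ definition above) =====
theorem encrypt_this_spec : Claim_equal_encrypt_this := by
  intro text _
  unfold Spec_encrypt_this encrypt_this encrypt_this_alt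
  rw [pv_scan_true]
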